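-- pv_equiv track=rewrite | github.com/tiendm1991/python | DynamicPrograming/waysToIncreaseLCSBy1_2.py | waysToIncreaseLCSBy1_2
-- ===== SOURCE A (Python) =====
-- def waysToIncreaseLCSBy1_2(s1, s2):
--     n1 = len(s1)
--     n2 = len(s2)
--     ch = 'abcdefghijklmnopqrstuvwxyz'
--     x = 0
--     dp1 = [[0 for i in range(n1 + 1)] for j in range(n2 + 1)]
--     for i in range(1, n2 + 1):
--         for j in range(1, n1 + 1):
--             if s2[i - 1] == s1[j - 1]:
--                 dp1[i][j] = dp1[i - 1][j - 1] + 1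
--             else:
--                 dp1[i][j] = max(dp1[i - 1][j], dp1[i][j - 1])
--     L = dp1[n2][n1]
--     dp2 = [[0 for i in range(n1 + 1)] for j in range(n2 + 1)]
--     for i in range(n2-1, -1, -1):
--         for j in range(n1-1, -1, -1):
--             if s2[i] == s1[j]:
--                 dp2[i][j] = dp2[i + 1][j + 1] + 1
--             else:
--                 dp2[i][j] = max(dp2[i + 1][j], dp2[i][j + 1])
--     for i in range(1, n2+1):
--         for j in range(n1+1):
--             x1 = dp1[i-1][j]
--             x2 = dp2[i][j]
--             if x1 + x2 == L:
--                 x += 1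
--     return x
-- ===== SOURCE B (Python) =====
-- def waysToIncreaseLCSBy1_2(s1, s2):
--     n1 = len(s1)
--     n2 = len(s2)
--     memoF = {}
--
--     def fwd(i, j):
--         # LCS of s2[:i] and s1[:j], top-down with a dict cache
--         if i == 0 or j == 0:
--             return 0
--         v = memoF.get((i, j))
--         if v is None:
--             if s2[i - 1] == s1[j - 1]:
--                 v = fwd(i - 1, j - 1) + 1
--             else:
--                 v = max(fwd(i - 1, j), fwd(i, j - 1))
--             memoF[(i, j)] = v
--         return v
--
--     memoB = {}
--
--     def suf(i, j):
--         # LCS of s2[i:] and s1[j:], top-down with a dict cache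
--         if i == n2 or j == n1:
--             return 0
--         v = memoB.get((i, j))
--         if v is None:
--             if s2[i] == s1[j]:
--                 v = suf(i + 1, j + 1) + 1
--             else:
--                 v = max(suf(i + 1, j), suf(i, j + 1))
--             memoB[(i, j)] = v
--         return v
--
--     L = fwd(n2, n1)
--     x = 0
--     for i in range(1, n2 + 1):
--         for j in range(n1 + 1):
--             if fwd(i - 1, j) + suf(i, j) == L:
--                 x += 1
--     return x
-- ===== Notes on version B (the rewrite author's own statement) =====
-- stated objective: alternative
-- what changed: A fills two preallocated (n2+1)x(n1+1) matrices bottom-up with index mutation and then re-reads them; B never builds a table: it defines the prefix-LCS and suffix-LCS as top-down recursive functions memoized in dict caches and lets the counting sweep query those recursions on demand.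
import Mathlib
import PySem

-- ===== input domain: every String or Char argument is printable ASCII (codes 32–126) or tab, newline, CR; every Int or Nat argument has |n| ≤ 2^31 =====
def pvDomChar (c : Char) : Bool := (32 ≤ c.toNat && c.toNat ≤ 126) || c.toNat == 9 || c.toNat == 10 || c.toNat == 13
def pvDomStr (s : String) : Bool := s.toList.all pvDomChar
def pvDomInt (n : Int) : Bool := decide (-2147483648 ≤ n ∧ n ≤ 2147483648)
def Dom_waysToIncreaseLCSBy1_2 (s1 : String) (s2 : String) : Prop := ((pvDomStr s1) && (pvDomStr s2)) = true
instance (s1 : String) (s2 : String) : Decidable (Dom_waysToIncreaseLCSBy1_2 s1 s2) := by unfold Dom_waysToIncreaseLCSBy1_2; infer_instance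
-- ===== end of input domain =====

-- B replaces A's two bottom-up, index-mutated DP matrices by top-down recursive prefix/suffix-LCS
-- functions memoized in dict caches, queried on demand by the counting sweep;
-- objective: alternative (recursive instead of iterative decomposition, same O(n1*n2) cost).

-- ===== PORT A =====
-- 2-D table read/write, dp[i][j] (all indices are in range in A's loops)
def pvGet2 (dp : List (List Int)) (i j : Nat) : Int := (dp.getD i []).getD j 0
def pvSet2 (dp : List (List Int)) (i j : Nat) (v : Int) : List (List Int) :=
  dp.set i ((dp.getD i []).set j v)

def waysToIncreaseLCSBy1_2 (s1 : String) (s2 : String) : Int :=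
  let a1 := s1.toList
  let a2 := s2.toList
  let n1 := a1.length
  let n2 := a2.length
  -- dp1 = [[0 for i in range(n1+1)] for j in range(n2+1)]
  let dp1 : List (List Int) := (List.range (n2+1)).map (fun _ => (List.range (n1+1)).map (fun _ => 0))
  -- for i in range(1, n2+1): for j in range(1, n1+1):   (List.range' 1 n = Python range(1, n+1))
  let dp1 := (List.range' 1 n2).foldl (fun dp i =>
    (List.range' 1 n1).foldl (fun dp j =>
      if a2.getD (i-1) ' ' == a1.getD (j-1) ' ' then
        pvSet2 dp i j (pvGet2 dp (i-1) (j-1) + 1)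
      else
        pvSet2 dp i j (max (pvGet2 dp (i-1) j) (pvGet2 dp i (j-1)))) dp) dp1
  let L := pvGet2 dp1 n2 n1
  let dp2 : List (List Int) := (List.range (n2+1)).map (fun _ => (List.range (n1+1)).map (fun _ => 0))
  -- for i in range(n2-1,-1,-1): for j in range(n1-1,-1,-1):   ((List.range n).reverse = that Python range)
  let dp2 := ((List.range n2).reverse).foldl (fun dp i =>
    ((List.range n1).reverse).foldl (fun dp j =>
      if a2.getD i ' ' == a1.getD j ' ' then
        pvSet2 dp i j (pvGet2 dp (i+1) (j+1) + 1)
      else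
        pvSet2 dp i j (max (pvGet2 dp (i+1) j) (pvGet2 dp i (j+1)))) dp) dp2
  -- for i in range(1, n2+1): for j in range(n1+1): if dp1[i-1][j] + dp2[i][j] == L: x += 1
  (List.range' 1 n2).foldl (fun x i =>
    (List.range (n1+1)).foldl (fun x j =>
      if pvGet2 dp1 (i-1) j + pvGet2 dp2 i j == L then x + 1 else x) x) (0 : Int)

-- ===== PORT B =====
-- Source B's nested 'fwd': the memo dict is threaded through explicitly (Python mutates memoF in place)
def pvFwd (a2 a1 : List Char) (i j : Nat) (m : PySem.Dict (Nat × Nat) Int) :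
    Int × PySem.Dict (Nat × Nat) Int :=
  if h : i = 0 ∨ j = 0 then (0, m)
  else
    match m.get? (i, j) with
    | some v => (v, m)
    | none =>
      let r :=
        if a2.getD (i-1) ' ' == a1.getD (j-1) ' ' then
          let r0 := pvFwd a2 a1 (i-1) (j-1) m
          (r0.1 + 1, r0.2)
        else
          let r1 := pvFwd a2 a1 (i-1) j m
          let r2 := pvFwd a2 a1 i (j-1) r1.2
          (max r1.1 r2.1, r2.2)
      (r.1, r.2.insert (i, j) r.1)
  termination_by i + j
  decreasing_by all_goals (push_neg at h; omega)

-- Source B's nested 'suf' (Python's 'i == n2 or j == n1' written as ≥ for totality; the two agree on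
-- every call Source B makes, where always i ≤ n2 and j ≤ n1)
def pvSuf (a2 a1 : List Char) (n2 n1 : Nat) (i j : Nat) (m : PySem.Dict (Nat × Nat) Int) :
    Int × PySem.Dict (Nat × Nat) Int :=
  if h : n2 ≤ i ∨ n1 ≤ j then (0, m)
  else
    match m.get? (i, j) with
    | some v => (v, m)
    | none =>
      let r :=
        if a2.getD i ' ' == a1.getD j ' ' then
          let r0 := pvSuf a2 a1 n2 n1 (i+1) (j+1) m
          (r0.1 + 1, r0.2)
        else
          let r1 := pvSuf a2 a1 n2 n1 (i+1) j m
          let r2 := pvSuf a2 a1 n2 n1 i (j+1) r1.2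
          (max r1.1 r2.1, r2.2)
      (r.1, r.2.insert (i, j) r.1)
  termination_by (n2 - i) + (n1 - j)
  decreasing_by all_goals (push_neg at h; omega)

def waysToIncreaseLCSBy1_2_alt (s1 : String) (s2 : String) : Int :=
  let a1 := s1.toList
  let a2 := s2.toList
  let n1 := a1.length
  let n2 := a2.length
  -- L = fwd(n2, n1), starting from the empty memoF
  let r := pvFwd a2 a1 n2 n1 PySem.Dict.empty
  let L := r.1
  -- the counting sweep; both memo dicts persist across iterations, as Source B's closures do
  let st := (List.range' 1 n2).foldl
    (fun (st : PySem.Dict (Nat × Nat) Int × PySem.Dict (Nat × Nat) Int × Int) i =>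
      (List.range (n1+1)).foldl (fun st j =>
        let rf := pvFwd a2 a1 (i-1) j st.1
        let rs := pvSuf a2 a1 n2 n1 i j st.2.1
        (rf.2, rs.2, if rf.1 + rs.1 == L then st.2.2 + 1 else st.2.2)) st)
    (r.2, PySem.Dict.empty, (0 : Int))
  st.2.2

-- ===== PRECONDITION & SPEC =====
def Spec_waysToIncreaseLCSBy1_2 (s1 : String) (s2 : String) (out : Int) : Prop := out = waysToIncreaseLCSBy1_2_alt s1 s2
instance (s1 : String) (s2 : String) (out : Int) : Decidable (Spec_waysToIncreaseLCSBy1_2 s1 s2 out) := by unfold Spec_waysToIncreaseLCSBy1_2; infer_instance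

-- ===== CLAIM (what is proved, stated in full; the proofs are below) =====
def Claim_equal_waysToIncreaseLCSBy1_2 : Prop := ∀ (s1 : String) (s2 : String), Dom_waysToIncreaseLCSBy1_2 s1 s2 → Spec_waysToIncreaseLCSBy1_2 s1 s2 (waysToIncreaseLCSBy1_2 s1 s2)

-- ===== LEMMAS AND PROOFS =====

-- LCS of the prefixes a[:i], b[:j] (shared spec: A's dp1 and B's fwd compute it)
def pvLcsF (a b : List Char) : Nat → Nat → Int
  | 0, _ => 0
  | _+1, 0 => 0
  | i+1, j+1 =>
    if a.getD i ' ' == b.getD j ' ' then pvLcsF a b i j + 1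
    else max (pvLcsF a b i (j+1)) (pvLcsF a b (i+1) j)
  termination_by i j => (i, j)

-- LCS of the suffixes a[i:], b[j:] (shared spec: A's dp2 and B's suf compute it)
def pvLcsS (a b : List Char) (i j : Nat) : Int :=
  if _h2 : i < a.length then
    if _h1 : j < b.length then
      if a.getD i ' ' == b.getD j ' ' then pvLcsS a b (i+1) (j+1) + 1
      else max (pvLcsS a b (i+1) j) (pvLcsS a b i (j+1))
    else 0
  else 0
  termination_by (a.length - i, b.length - j)
  decreasing_by all_goals simp_wf <;> omega

-- the (n2+1) × (n1+1) table with entries f r c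
def pvTbl (n2 n1 : Nat) (f : Nat → Nat → Int) : List (List Int) :=
  (List.range (n2+1)).map (fun r => (List.range (n1+1)).map (f r))

lemma pvLcsF_zero_left (a b : List Char) (c : Nat) : pvLcsF a b 0 c = 0 := by
  cases c <;> simp [pvLcsF]

lemma pvLcsF_zero_right (a b : List Char) (i : Nat) : pvLcsF a b i 0 = 0 := by
  cases i <;> simp [pvLcsF]

lemma pvLcsF_succ (a b : List Char) (i j : Nat) :
    pvLcsF a b (i+1) (j+1)
      = if a.getD i ' ' == b.getD j ' ' then pvLcsF a b i j + 1
        else max (pvLcsF a b i (j+1)) (pvLcsF a b (i+1) j) := by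
  simp [pvLcsF]

lemma pvLcsS_oob_left (a b : List Char) (i j : Nat) (h : a.length ≤ i) : pvLcsS a b i j = 0 := by
  rw [pvLcsS]; simp [Nat.not_lt.mpr h]

lemma pvLcsS_oob_right (a b : List Char) (i j : Nat) (h : b.length ≤ j) : pvLcsS a b i j = 0 := by
  rw [pvLcsS]; simp [Nat.not_lt.mpr h]

lemma pvLcsS_step (a b : List Char) (i j : Nat) (hi : i < a.length) (hj : j < b.length) :
    pvLcsS a b i j
      = if a.getD i ' ' == b.getD j ' ' then pvLcsS a b (i+1) (j+1) + 1
        else max (pvLcsS a b (i+1) j) (pvLcsS a b i (j+1)) := by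
  rw [pvLcsS]; simp [hi, hj]

-- map/range utilities
lemma getD_map_range' {α : Type} (n : Nat) (g : Nat → α) (r : Nat) (d : α) (hr : r < n) :
    ((List.range n).map g).getD r d = g r := by
  simp [List.getD_eq_getElem?_getD, hr]

lemma set_map_range {α : Type} (n : Nat) (g : Nat → α) (i : Nat) (v : α) :
    ((List.range n).map g).set i v = (List.range n).map (fun r => if r = i then v else g r) := by
  apply List.ext_getElem (by simp)
  intro k h1 h2
  simp only [List.getElem_set, List.getElem_map, List.getElem_range]
  rcases eq_or_ne i k with h | h
  · simp [h]
  · simp [h, h.symm]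

-- table lemmas
lemma pvGet2_tbl (n2 n1 : Nat) (f : Nat → Nat → Int) (r c : Nat) (hr : r ≤ n2) (hc : c ≤ n1) :
    pvGet2 (pvTbl n2 n1 f) r c = f r c := by
  unfold pvGet2 pvTbl
  rw [getD_map_range' _ _ _ _ (by omega), getD_map_range' _ _ _ _ (by omega)]

lemma pvSet2_tbl (n2 n1 : Nat) (f : Nat → Nat → Int) (i j : Nat) (v : Int)
    (hi : i ≤ n2) (hj : j ≤ n1) :
    pvSet2 (pvTbl n2 n1 f) i j v
      = pvTbl n2 n1 (fun r c => if r = i ∧ c = j then v else f r c) := by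
  unfold pvSet2 pvTbl
  rw [getD_map_range' _ _ _ _ (by omega), set_map_range, set_map_range]
  apply List.map_congr_left
  intro r hr
  rcases eq_or_ne r i with h | h
  · subst h
    rw [if_pos rfl]
    apply List.map_congr_left
    intro c hc
    simp
  · simp only [h, if_false]
    apply List.map_congr_left
    intro c hc
    simp [h]

lemma pvTbl_congr (n2 n1 : Nat) (f g : Nat → Nat → Int)
    (h : ∀ r ≤ n2, ∀ c ≤ n1, f r c = g r c) : pvTbl n2 n1 f = pvTbl n2 n1 g := by
  unfold pvTbl
  apply List.map_congr_left
  intro r hr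
  apply List.map_congr_left
  intro c hc
  simp only [List.mem_range] at hr hc
  exact h r (by omega) c (by omega)

-- ===== A side: the two table fills compute pvLcsF / pvLcsS =====

-- partially filled dp1: rows < i done, row i done up to column j
def pvFi (a b : List Char) (i j : Nat) : Nat → Nat → Int := fun r c =>
  if r < i then pvLcsF a b r c
  else if r = i ∧ c ≤ j then pvLcsF a b r c
  else 0

lemma A_inner1 (b a : List Char) (i' : Nat) (h2 : i' + 1 ≤ a.length) (t : Nat) (ht : t ≤ b.length) :
    (List.range' 1 t).foldl (fun dp j =>
        if a.getD (i'+1-1) ' ' == b.getD (j-1) ' ' then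
          pvSet2 dp (i'+1) j (pvGet2 dp (i'+1-1) (j-1) + 1)
        else
          pvSet2 dp (i'+1) j (max (pvGet2 dp (i'+1-1) j) (pvGet2 dp (i'+1) (j-1))))
      (pvTbl a.length b.length (pvFi a b (i'+1) 0))
    = pvTbl a.length b.length (pvFi a b (i'+1) t) := by
  induction t with
  | zero => simp
  | succ t ih =>
    rw [List.range'_1_concat, List.foldl_append, ih (by omega)]
    simp only [List.foldl_cons, List.foldl_nil, Nat.add_sub_cancel,
      show ∀ t : Nat, 1 + t - 1 = t from fun t => by omega]
    rw [← apply_ite (pvSet2 (pvTbl a.length b.length (pvFi a b (i'+1) t)) (i'+1) (1+t))]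
    rw [pvGet2_tbl _ _ _ _ _ (by omega) (by omega),
        pvGet2_tbl _ _ _ _ _ (by omega) (by omega),
        pvGet2_tbl _ _ _ _ _ (by omega) (by omega),
        pvSet2_tbl _ _ _ _ _ _ (by omega) (by omega)]
    apply pvTbl_congr
    intro r hr c hc
    by_cases hm : r = i' + 1 ∧ c = 1 + t
    · obtain ⟨rfl, rfl⟩ := hm
      rw [if_pos ⟨rfl, rfl⟩]
      simp only [pvFi, Nat.lt_succ_self, if_pos, if_true]
      rw [show 1 + t = t + 1 from by omega, pvLcsF_succ]
      simp [Nat.lt_irrefl]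
    · rw [if_neg hm]
      simp only [pvFi]
      split_ifs with c1 c2 c3 c4 c5 <;> first | rfl | omega

lemma A_dp1 (b a : List Char) :
    (List.range' 1 a.length).foldl (fun dp i =>
        (List.range' 1 b.length).foldl (fun dp j =>
          if a.getD (i-1) ' ' == b.getD (j-1) ' ' then
            pvSet2 dp i j (pvGet2 dp (i-1) (j-1) + 1)
          else
            pvSet2 dp i j (max (pvGet2 dp (i-1) j) (pvGet2 dp i (j-1)))) dp)
      ((List.range (a.length+1)).map (fun _ => (List.range (b.length+1)).map (fun _ => 0)))
    = pvTbl a.length b.length (pvLcsF a b) := by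
  have h0 : (List.range (a.length+1)).map (fun _ => (List.range (b.length+1)).map (fun _ => (0:Int)))
      = pvTbl a.length b.length (fun r c => if r ≤ 0 then pvLcsF a b r c else 0) := by
    unfold pvTbl
    apply List.map_congr_left
    intro r hr
    apply List.map_congr_left
    intro c hc
    rcases Nat.eq_zero_or_pos r with h | h
    · subst h; simp [pvLcsF_zero_left]
    · simp [show ¬ (r ≤ 0) from by omega]
  rw [h0]
  have main : ∀ m, m ≤ a.length →
      (List.range' 1 m).foldl (fun dp i =>
          (List.range' 1 b.length).foldl (fun dp j =>
            if a.getD (i-1) ' ' == b.getD (j-1) ' ' then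
              pvSet2 dp i j (pvGet2 dp (i-1) (j-1) + 1)
            else
              pvSet2 dp i j (max (pvGet2 dp (i-1) j) (pvGet2 dp i (j-1)))) dp)
        (pvTbl a.length b.length (fun r c => if r ≤ 0 then pvLcsF a b r c else 0))
      = pvTbl a.length b.length (fun r c => if r ≤ m then pvLcsF a b r c else 0) := by
    intro m
    induction m with
    | zero => intro _; rfl
    | succ m ih =>
      intro hm
      rw [List.range'_1_concat, List.foldl_append, ih (by omega)]
      simp only [List.foldl_cons, List.foldl_nil]
      have hstart : pvTbl a.length b.length (fun r c => if r ≤ m then pvLcsF a b r c else 0)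
          = pvTbl a.length b.length (pvFi a b (m+1) 0) := by
        apply pvTbl_congr
        intro r hr c hc
        simp only [pvFi]
        rcases Nat.lt_trichotomy r (m+1) with h | h | h
        · rw [if_pos (by omega), if_pos h]
        · rw [if_neg (by omega), if_neg (by omega)]
          by_cases hc0 : c ≤ 0
          · rw [if_pos ⟨h, hc0⟩, show c = 0 from by omega, pvLcsF_zero_right]
          · rw [if_neg (by tauto)]
        · rw [if_neg (by omega), if_neg (by omega), if_neg (by rintro ⟨he, -⟩; omega)]
      rw [show (1 + m) = m + 1 from by omega, hstart, A_inner1 b a m (by omega) b.length le_rfl]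
      apply pvTbl_congr
      intro r hr c hc
      simp only [pvFi]
      rcases Nat.lt_trichotomy r (m+1) with h | h | h
      · rw [if_pos h, if_pos (by omega)]
      · rw [if_neg (by omega), if_pos ⟨h, hc⟩, if_pos (by omega)]
      · rw [if_neg (by omega), if_neg (by rintro ⟨he, -⟩; omega), if_neg (by omega)]
  rw [main a.length le_rfl]
  apply pvTbl_congr
  intro r hr c hc
  simp [hr]

-- partially filled dp2: rows > i done, row i done from column j rightwards
def pvHi (a b : List Char) (i j : Nat) : Nat → Nat → Int := fun r c =>
  if i < r then pvLcsS a b r c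
  else if r = i ∧ j ≤ c then pvLcsS a b r c
  else 0

lemma A_inner2 (b a : List Char) (i : Nat) (hi : i < a.length) (m : Nat) (hm : m ≤ b.length) :
    ((List.range m).reverse).foldl (fun dp j =>
        if a.getD i ' ' == b.getD j ' ' then
          pvSet2 dp i j (pvGet2 dp (i+1) (j+1) + 1)
        else
          pvSet2 dp i j (max (pvGet2 dp (i+1) j) (pvGet2 dp i (j+1))))
      (pvTbl a.length b.length (pvHi a b i m))
    = pvTbl a.length b.length (pvHi a b i 0) := by
  induction m with
  | zero => simp
  | succ m ih =>
    rw [show (List.range (m+1)).reverse = m :: (List.range m).reverse from by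
      simp [List.range_succ]]
    simp only [List.foldl_cons]
    have step : (if a.getD i ' ' == b.getD m ' ' then
          pvSet2 (pvTbl a.length b.length (pvHi a b i (m+1))) i m
            (pvGet2 (pvTbl a.length b.length (pvHi a b i (m+1))) (i+1) (m+1) + 1)
        else
          pvSet2 (pvTbl a.length b.length (pvHi a b i (m+1))) i m
            (max (pvGet2 (pvTbl a.length b.length (pvHi a b i (m+1))) (i+1) m)
                 (pvGet2 (pvTbl a.length b.length (pvHi a b i (m+1))) i (m+1))))
        = pvTbl a.length b.length (pvHi a b i m) := by
      rw [← apply_ite (pvSet2 (pvTbl a.length b.length (pvHi a b i (m+1))) i m)]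
      rw [pvGet2_tbl _ _ _ _ _ (by omega) (by omega),
          pvGet2_tbl _ _ _ _ _ (by omega) (by omega),
          pvGet2_tbl _ _ _ _ _ (by omega) (by omega),
          pvSet2_tbl _ _ _ _ _ _ (by omega) (by omega)]
      apply pvTbl_congr
      intro r hr c hc
      by_cases hrc : r = i ∧ c = m
      · obtain ⟨rfl, rfl⟩ := hrc
        rw [if_pos ⟨rfl, rfl⟩]
        simp only [pvHi, Nat.lt_irrefl, if_false, Nat.lt_succ_self, if_pos, if_true]
        rw [pvLcsS_step a b r c hi (by omega)]
        simp [Nat.lt_irrefl]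
      · rw [if_neg hrc]
        simp only [pvHi]
        split_ifs <;> first | rfl | omega
    rw [step, ih (by omega)]

lemma A_dp2 (b a : List Char) :
    ((List.range a.length).reverse).foldl (fun dp i =>
        ((List.range b.length).reverse).foldl (fun dp j =>
          if a.getD i ' ' == b.getD j ' ' then
            pvSet2 dp i j (pvGet2 dp (i+1) (j+1) + 1)
          else
            pvSet2 dp i j (max (pvGet2 dp (i+1) j) (pvGet2 dp i (j+1)))) dp)
      ((List.range (a.length+1)).map (fun _ => (List.range (b.length+1)).map (fun _ => 0)))
    = pvTbl a.length b.length (pvLcsS a b) := by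
  have h0 : (List.range (a.length+1)).map (fun _ => (List.range (b.length+1)).map (fun _ => (0:Int)))
      = pvTbl a.length b.length (fun r c => if a.length ≤ r then pvLcsS a b r c else 0) := by
    unfold pvTbl
    apply List.map_congr_left
    intro r hr
    apply List.map_congr_left
    intro c hc
    rcases Nat.lt_or_ge r a.length with h | h
    · simp [show ¬ (a.length ≤ r) from by omega]
    · simp [h, pvLcsS_oob_left a b r c h]
  rw [h0]
  have main : ∀ m, m ≤ a.length →
      ((List.range m).reverse).foldl (fun dp i =>
          ((List.range b.length).reverse).foldl (fun dp j =>
            if a.getD i ' ' == b.getD j ' ' then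
              pvSet2 dp i j (pvGet2 dp (i+1) (j+1) + 1)
            else
              pvSet2 dp i j (max (pvGet2 dp (i+1) j) (pvGet2 dp i (j+1)))) dp)
        (pvTbl a.length b.length (fun r c => if m ≤ r then pvLcsS a b r c else 0))
      = pvTbl a.length b.length (fun r c => if 0 ≤ r then pvLcsS a b r c else 0) := by
    intro m
    induction m with
    | zero => intro _; rfl
    | succ m ih =>
      intro hm
      rw [show (List.range (m+1)).reverse = m :: (List.range m).reverse from by
        simp [List.range_succ]]
      simp only [List.foldl_cons]
      have hstart : pvTbl a.length b.length (fun r c => if m + 1 ≤ r then pvLcsS a b r c else 0)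
          = pvTbl a.length b.length (pvHi a b m b.length) := by
        apply pvTbl_congr
        intro r hr c hc
        simp only [pvHi]
        rcases Nat.lt_trichotomy m r with h | h | h
        · rw [if_pos (by omega), if_pos h]
        · subst h
          rw [if_neg (by omega), if_neg (by omega)]
          by_cases hcb : b.length ≤ c
          · rw [if_pos ⟨rfl, hcb⟩, pvLcsS_oob_right a b m c hcb]
          · rw [if_neg (by tauto)]
        · rw [if_neg (by omega), if_neg (by omega), if_neg (by rintro ⟨he, -⟩; omega)]
      rw [hstart, A_inner2 b a m (by omega) b.length le_rfl]
      have hend : pvTbl a.length b.length (pvHi a b m 0)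
          = pvTbl a.length b.length (fun r c => if m ≤ r then pvLcsS a b r c else 0) := by
        apply pvTbl_congr
        intro r hr c hc
        simp only [pvHi]
        rcases Nat.lt_trichotomy m r with h | h | h
        · rw [if_pos h, if_pos (by omega)]
        · subst h
          rw [if_neg (by omega), if_pos ⟨rfl, Nat.zero_le c⟩, if_pos le_rfl]
        · rw [if_neg (by omega), if_neg (by rintro ⟨he, -⟩; omega), if_neg (by omega)]
      rw [hend, ih (by omega)]
  have := main a.length le_rfl
  rw [this]
  apply pvTbl_congr
  intro r hr c hc
  simp

-- the common counting sweep, expressed on the spec functions (A's loop shape)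
def pvCount (b a : List Char) : Int :=
  (List.range' 1 a.length).foldl (fun x i =>
    (List.range (b.length+1)).foldl (fun x j =>
      if pvLcsF a b (i-1) j + pvLcsS a b i j == pvLcsF a b a.length b.length then x + 1 else x) x) 0

lemma A_eq (s1 s2 : String) : waysToIncreaseLCSBy1_2 s1 s2 = pvCount s1.toList s2.toList := by
  simp only [waysToIncreaseLCSBy1_2]
  rw [A_dp1 s1.toList s2.toList, A_dp2 s1.toList s2.toList]
  unfold pvCount
  apply PySem.List.foldl_congr_mem'
  intro i hi x
  apply PySem.List.foldl_congr_mem'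
  intro j hj x
  rw [List.mem_range'_1] at hi
  rw [List.mem_range] at hj
  rw [pvGet2_tbl _ _ _ _ _ (by omega) (by omega),
      pvGet2_tbl _ _ _ _ _ (by omega) (by omega),
      pvGet2_tbl _ _ _ _ _ le_rfl le_rfl]

-- ===== B side: the memoized recursions compute pvLcsF / pvLcsS =====

-- memo-cache invariant: every cached entry is the spec value
def pvInvF (a2 a1 : List Char) (m : PySem.Dict (Nat × Nat) Int) : Prop :=
  ∀ p v, m.get? p = some v → v = pvLcsF a2 a1 p.1 p.2

def pvInvS (a2 a1 : List Char) (m : PySem.Dict (Nat × Nat) Int) : Prop :=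
  ∀ p v, m.get? p = some v → v = pvLcsS a2 a1 p.1 p.2

lemma pvInvF_insert (a2 a1 : List Char) (m : PySem.Dict (Nat × Nat) Int) (i j : Nat) (v : Int)
    (hm : pvInvF a2 a1 m) (hv : v = pvLcsF a2 a1 i j) :
    pvInvF a2 a1 (m.insert (i, j) v) := by
  intro p w hw
  rw [PySem.Dict.get?_insert] at hw
  split_ifs at hw with hp
  · cases hw; cases hp; exact hv
  · exact hm p w hw

lemma pvInvS_insert (a2 a1 : List Char) (m : PySem.Dict (Nat × Nat) Int) (i j : Nat) (v : Int)
    (hm : pvInvS a2 a1 m) (hv : v = pvLcsS a2 a1 i j) :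
    pvInvS a2 a1 (m.insert (i, j) v) := by
  intro p w hw
  rw [PySem.Dict.get?_insert] at hw
  split_ifs at hw with hp
  · cases hw; cases hp; exact hv
  · exact hm p w hw

lemma pvFwd_ok (a2 a1 : List Char) :
    ∀ (n i j : Nat) (m : PySem.Dict (Nat × Nat) Int), i + j ≤ n → pvInvF a2 a1 m →
      (pvFwd a2 a1 i j m).1 = pvLcsF a2 a1 i j ∧ pvInvF a2 a1 (pvFwd a2 a1 i j m).2 := by
  intro n
  induction n with
  | zero =>
    intro i j m hn hm
    have hi : i = 0 := by omega
    rw [pvFwd, dif_pos (Or.inl hi)]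
    exact ⟨by rw [hi, pvLcsF_zero_left], hm⟩
  | succ n ih =>
    intro i j m hn hm
    by_cases h0 : i = 0 ∨ j = 0
    · rw [pvFwd, dif_pos h0]
      refine ⟨?_, hm⟩
      rcases h0 with h | h
      · rw [h, pvLcsF_zero_left]
      · rw [h, pvLcsF_zero_right]
    · push_neg at h0
      obtain ⟨i', rfl⟩ : ∃ i', i = i' + 1 := ⟨i - 1, by omega⟩
      obtain ⟨j', rfl⟩ : ∃ j', j = j' + 1 := ⟨j - 1, by omega⟩
      rw [pvFwd, dif_neg (by omega)]
      cases hc : m.get? (i' + 1, j' + 1) with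
      | some v => exact ⟨hm _ v hc, hm⟩
      | none =>
        simp only []
        rw [pvLcsF_succ]
        by_cases hch : a2.getD (i' + 1 - 1) ' ' == a1.getD (j' + 1 - 1) ' '
        · obtain ⟨h1, h2⟩ := ih i' j' m (by omega) hm
          simp only [Nat.add_sub_cancel] at hch ⊢
          rw [if_pos hch, if_pos hch]
          refine ⟨by rw [h1], pvInvF_insert _ _ _ _ _ _ h2 ?_⟩
          rw [h1, pvLcsF_succ, if_pos hch]
        · obtain ⟨h1, h2⟩ := ih i' (j' + 1) m (by omega) hm
          obtain ⟨h3, h4⟩ := ih (i' + 1) j' _ (by omega) h2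
          simp only [Nat.add_sub_cancel] at hch ⊢
          rw [if_neg hch, if_neg hch]
          refine ⟨by rw [h1, h3], pvInvF_insert _ _ _ _ _ _ h4 ?_⟩
          rw [h1, h3, pvLcsF_succ, if_neg hch]

lemma pvSuf_ok (a2 a1 : List Char) :
    ∀ (n i j : Nat) (m : PySem.Dict (Nat × Nat) Int),
      (a2.length - i) + (a1.length - j) ≤ n → pvInvS a2 a1 m →
      (pvSuf a2 a1 a2.length a1.length i j m).1 = pvLcsS a2 a1 i j ∧
        pvInvS a2 a1 (pvSuf a2 a1 a2.length a1.length i j m).2 := by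
  intro n
  induction n with
  | zero =>
    intro i j m hn hm
    have hi : a2.length ≤ i := by omega
    rw [pvSuf, dif_pos (Or.inl hi)]
    exact ⟨(pvLcsS_oob_left a2 a1 i j hi).symm, hm⟩
  | succ n ih =>
    intro i j m hn hm
    by_cases h0 : a2.length ≤ i ∨ a1.length ≤ j
    · rw [pvSuf, dif_pos h0]
      refine ⟨?_, hm⟩
      rcases h0 with h | h
      · exact (pvLcsS_oob_left a2 a1 i j h).symm
      · exact (pvLcsS_oob_right a2 a1 i j h).symm
    · push_neg at h0
      obtain ⟨hi, hj⟩ := h0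
      rw [pvSuf, dif_neg (by omega)]
      cases hc : m.get? (i, j) with
      | some v => exact ⟨hm _ v hc, hm⟩
      | none =>
        simp only []
        rw [pvLcsS_step a2 a1 i j hi hj]
        by_cases hch : a2.getD i ' ' == a1.getD j ' '
        · obtain ⟨h1, h2⟩ := ih (i + 1) (j + 1) m (by omega) hm
          rw [if_pos hch, if_pos hch]
          refine ⟨by rw [h1], pvInvS_insert _ _ _ _ _ _ h2 ?_⟩
          rw [h1, pvLcsS_step a2 a1 i j hi hj, if_pos hch]
        · obtain ⟨h1, h2⟩ := ih (i + 1) j m (by omega) hm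
          obtain ⟨h3, h4⟩ := ih i (j + 1) _ (by omega) h2
          rw [if_neg hch, if_neg hch]
          refine ⟨by rw [h1, h3], pvInvS_insert _ _ _ _ _ _ h4 ?_⟩
          rw [h1, h3, pvLcsS_step a2 a1 i j hi hj, if_neg hch]

-- the counting sweep of B, with the two memo dicts threaded, projects to the plain sweep
lemma B_inner (a2 a1 : List Char) (L : Int) (i : Nat) (js : List Nat)
    (st : PySem.Dict (Nat × Nat) Int × PySem.Dict (Nat × Nat) Int × Int)
    (hF : pvInvF a2 a1 st.1) (hS : pvInvS a2 a1 st.2.1) :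
    (js.foldl (fun st j =>
        let rf := pvFwd a2 a1 (i-1) j st.1
        let rs := pvSuf a2 a1 a2.length a1.length i j st.2.1
        (rf.2, rs.2, if rf.1 + rs.1 == L then st.2.2 + 1 else st.2.2)) st).2.2
      = js.foldl (fun x j =>
          if pvLcsF a2 a1 (i-1) j + pvLcsS a2 a1 i j == L then x + 1 else x) st.2.2 ∧
    pvInvF a2 a1 (js.foldl (fun st j =>
        let rf := pvFwd a2 a1 (i-1) j st.1
        let rs := pvSuf a2 a1 a2.length a1.length i j st.2.1
        (rf.2, rs.2, if rf.1 + rs.1 == L then st.2.2 + 1 else st.2.2)) st).1 ∧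
    pvInvS a2 a1 (js.foldl (fun st j =>
        let rf := pvFwd a2 a1 (i-1) j st.1
        let rs := pvSuf a2 a1 a2.length a1.length i j st.2.1
        (rf.2, rs.2, if rf.1 + rs.1 == L then st.2.2 + 1 else st.2.2)) st).2.1 := by
  induction js generalizing st with
  | nil => exact ⟨rfl, hF, hS⟩
  | cons j js ih =>
    simp only [List.foldl_cons]
    obtain ⟨hf1, hf2⟩ := pvFwd_ok a2 a1 ((i-1) + j) (i-1) j st.1 le_rfl hF
    obtain ⟨hs1, hs2⟩ := pvSuf_ok a2 a1 ((a2.length - i) + (a1.length - j)) i j st.2.1 le_rfl hS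
    rw [hf1, hs1]
    exact ih (st := ((pvFwd a2 a1 (i-1) j st.1).2,
        (pvSuf a2 a1 a2.length a1.length i j st.2.1).2,
        if pvLcsF a2 a1 (i-1) j + pvLcsS a2 a1 i j == L
          then st.2.2 + 1 else st.2.2)) hf2 hs2

lemma B_eq (s1 s2 : String) : waysToIncreaseLCSBy1_2_alt s1 s2 = pvCount s1.toList s2.toList := by
  simp only [waysToIncreaseLCSBy1_2_alt]
  set a1 := s1.toList
  set a2 := s2.toList
  have hInvE : pvInvF a2 a1 PySem.Dict.empty := by
    intro p v h; rw [PySem.Dict.get?_empty] at h; cases h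
  obtain ⟨hL1, hL2⟩ := pvFwd_ok a2 a1 (a2.length + a1.length) a2.length a1.length
    PySem.Dict.empty le_rfl hInvE
  have hSE : pvInvS a2 a1 PySem.Dict.empty := by
    intro p v h; rw [PySem.Dict.get?_empty] at h; cases h
  unfold pvCount
  have main : ∀ (is : List Nat)
      (st : PySem.Dict (Nat × Nat) Int × PySem.Dict (Nat × Nat) Int × Int),
      pvInvF a2 a1 st.1 → pvInvS a2 a1 st.2.1 →
      (is.foldl (fun st i =>
          (List.range (a1.length+1)).foldl (fun st j =>
            let rf := pvFwd a2 a1 (i-1) j st.1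
            let rs := pvSuf a2 a1 a2.length a1.length i j st.2.1
            (rf.2, rs.2, if rf.1 + rs.1 == (pvFwd a2 a1 a2.length a1.length PySem.Dict.empty).1
              then st.2.2 + 1 else st.2.2)) st) st).2.2
        = is.foldl (fun x i =>
            (List.range (a1.length+1)).foldl (fun x j =>
              if pvLcsF a2 a1 (i-1) j + pvLcsS a2 a1 i j == pvLcsF a2 a1 a2.length a1.length
                then x + 1 else x) x) st.2.2 := by
    intro is
    induction is with
    | nil => intro st _ _; rfl
    | cons i is ih =>
      intro st hF hS
      simp only [List.foldl_cons]
      obtain ⟨h1, h2, h3⟩ := B_inner a2 a1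
        (pvFwd a2 a1 a2.length a1.length PySem.Dict.empty).1 i
        (List.range (a1.length+1)) st hF hS
      rw [ih _ h2 h3, h1, hL1]
  have := main (List.range' 1 a2.length) ((pvFwd a2 a1 a2.length a1.length PySem.Dict.empty).2,
    PySem.Dict.empty, (0 : Int)) hL2 hSE
  simpa [hL1] using this

-- ===== VERDICT (by name: the statement is the Claim_ definition above) =====
theorem waysToIncreaseLCSBy1_2_spec : Claim_equal_waysToIncreaseLCSBy1_2 := by
  intro s1 s2 _
  unfold Spec_waysToIncreaseLCSBy1_2
  rw [A_eq, B_eq]
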